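-- pv_equiv track=rewrite | github.com/CalvQ/Algorithms | solutions/GlobalMaxInterval.py | globalMax
-- ===== SOURCE A (Python) =====
-- from typing import List
--
-- def globalMax(nums: List[int], m: int) -> int:
--     intervals = []
--     for i in range(len(nums)-1):
--         intervals.append(nums[i+1]-nums[i])
--
--     def t_calc(t): return t[0] + t[1]
--
--     while len(intervals) > m-1:
--         gaps = [t_calc((intervals[i], intervals[i+1]))
--                 for i in range(len(intervals)-1)]
--         minimum = min(gaps)
--         index = gaps.index(minimum)
--         intervals = intervals[:index] + [minimum] + intervals[index+2:]
--     return min(intervals)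
-- ===== SOURCE B (Python) =====
-- from typing import List
--
-- def _ins(evs, e):
--     # insert e into ascending-sorted evs, after any equal entries
--     for idx in range(len(evs)):
--         if e < evs[idx]:
--             return evs[:idx] + [e] + evs[idx:]
--     return evs + [e]
--
-- def globalMax(nums: List[int], m: int) -> int:
--     k = len(nums) - 1
--     val = [nums[i + 1] - nums[i] for i in range(k)]
--     target = m - 1
--     if k <= target:
--         return min(val)
--     nxt = [i + 1 for i in range(k)]
--     nxt[k - 1] = -1
--     prv = [i - 1 for i in range(k)]
--     alive = [True] * k
--     events = sorted((val[i] + val[i + 1], i, i + 1) for i in range(k - 1))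
--     for _ in range(k - target):
--         while True:
--             s, i, j = events.pop(0)
--             if alive[i] and nxt[i] == j and val[i] + val[j] == s:
--                 break
--         val[i] = s
--         alive[j] = False
--         nxt[i] = nxt[j]
--         if nxt[j] != -1:
--             prv[nxt[j]] = i
--         if prv[i] != -1:
--             events = _ins(events, (val[prv[i]] + s, prv[i], i))
--         if nxt[i] != -1:
--             events = _ins(events, (s + val[nxt[i]], i, nxt[i]))
--     return min(val[i] for i in range(k) if alive[i])
-- ===== Notes on version B (the rewrite author's own statement) =====
-- stated objective: alternative
-- what changed: Instead of rebuilding the whole gap array and rescanning it for the minimum on every round, B keeps a doubly-linked list of surviving intervals plus a sorted event queue of adjacent-pair sums with lazy invalidation, popping the smallest still-valid pair each round.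
import Mathlib
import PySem

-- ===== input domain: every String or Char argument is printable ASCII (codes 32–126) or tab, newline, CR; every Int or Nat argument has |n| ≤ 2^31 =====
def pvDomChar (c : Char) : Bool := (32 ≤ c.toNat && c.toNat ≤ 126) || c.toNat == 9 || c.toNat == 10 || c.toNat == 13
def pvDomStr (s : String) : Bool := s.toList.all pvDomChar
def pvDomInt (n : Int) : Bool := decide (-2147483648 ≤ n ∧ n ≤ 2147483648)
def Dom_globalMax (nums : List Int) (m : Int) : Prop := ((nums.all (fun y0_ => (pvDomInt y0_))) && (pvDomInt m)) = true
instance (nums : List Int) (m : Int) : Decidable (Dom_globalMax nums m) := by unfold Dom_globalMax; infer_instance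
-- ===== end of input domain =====

-- B replaces A's per-round rebuild-and-rescan of the gap list by a doubly-linked list of
-- surviving intervals plus an ascending event queue of adjacent-pair sums with lazy
-- invalidation (objective: alternative algorithm, no speed claim).

-- ===== PORT A =====
def tCalc (t : Int × Int) : Int := t.1 + t.2

def loopA : Nat → List Int → Int → List Int
  | 0, intervals, _ => intervals
  | fuel + 1, intervals, m =>
    if m - 1 < (intervals.length : Int) then
      let gaps := (PySem.List.pyRange 0 ((intervals.length : Int) - 1) 1).map
        (fun i => tCalc (PySem.List.pyGetD intervals i 0, PySem.List.pyGetD intervals (i + 1) 0))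
      let minimum := (PySem.List.min? gaps (fun x => x)).getD 0
      let index := (PySem.List.index? gaps minimum).getD 0
      loopA fuel (PySem.List.slice intervals none (some (index : Int)) ++ [minimum] ++
        PySem.List.slice intervals (some ((index : Int) + 2)) none) m
    else intervals

def globalMax (nums : List Int) (m : Int) : Int :=
  let intervals := (PySem.List.pyRange 0 ((nums.length : Int) - 1) 1).foldl
    (fun acc i => acc ++ [PySem.List.pyGetD nums (i + 1) 0 - PySem.List.pyGetD nums i 0]) []
  -- fuel: the while loop shrinks `intervals` by one each round, so `intervals.length` rounds suffice
  (PySem.List.min? (loopA intervals.length intervals m) (fun x => x)).getD 0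

-- ===== PORT B =====
def evtLt (e f : Int × Int × Int) : Bool :=
  decide (e.1 < f.1) || (decide (e.1 = f.1) &&
    (decide (e.2.1 < f.2.1) || (decide (e.2.1 = f.2.1) && decide (e.2.2 < f.2.2))))

def insEvt (e : Int × Int × Int) : List (Int × Int × Int) → List (Int × Int × Int)
  | [] => [e]
  | f :: t => if evtLt e f then e :: f :: t else f :: insEvt e t

def evtValid (val nxt : List Int) (alive : List Bool) (e : Int × Int × Int) : Bool :=
  PySem.List.pyGetD alive e.2.1 false &&
  decide (PySem.List.pyGetD nxt e.2.1 0 = e.2.2) &&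
  decide (PySem.List.pyGetD val e.2.1 0 + PySem.List.pyGetD val e.2.2 0 = e.1)

def popValid (val nxt : List Int) (alive : List Bool) :
    List (Int × Int × Int) → (Int × Int × Int) × List (Int × Int × Int)
  | [] => ((0, -1, -1), [])   -- Python raises IndexError here; unreachable under Pre_
  | e :: rest => if evtValid val nxt alive e then (e, rest) else popValid val nxt alive rest

def loopB : Nat → List Int → List Int → List Int → List Bool → List (Int × Int × Int) →
    List Int × List Bool
  | 0, val, _, _, alive, _ => (val, alive)
  | c + 1, val, nxt, prv, alive, events =>
    let pe := popValid val nxt alive events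
    let s := pe.1.1
    let i := pe.1.2.1
    let j := pe.1.2.2
    let val1 := PySem.List.pySetD val i s
    let alive1 := PySem.List.pySetD alive j false
    let nj := PySem.List.pyGetD nxt j 0
    let nxt1 := PySem.List.pySetD nxt i nj
    let prv1 := if nj ≠ -1 then PySem.List.pySetD prv nj i else prv
    let pi := PySem.List.pyGetD prv1 i 0
    let ev2 := if pi ≠ -1 then insEvt (PySem.List.pyGetD val1 pi 0 + s, pi, i) pe.2 else pe.2
    let ev3 := if nj ≠ -1 then insEvt (s + PySem.List.pyGetD val1 nj 0, i, nj) ev2 else ev2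
    loopB c val1 nxt1 prv1 alive1 ev3

def globalMax_alt (nums : List Int) (m : Int) : Int :=
  let k : Int := (nums.length : Int) - 1
  let val := (PySem.List.pyRange 0 k 1).map
    (fun i => PySem.List.pyGetD nums (i + 1) 0 - PySem.List.pyGetD nums i 0)
  let target := m - 1
  if k ≤ target then (PySem.List.min? val (fun x => x)).getD 0
  else
    let nxt := PySem.List.pySetD ((PySem.List.pyRange 0 k 1).map (fun i => i + 1)) (k - 1) (-1)
    let prv := (PySem.List.pyRange 0 k 1).map (fun i => i - 1)
    let alive := PySem.List.pyRepeat [true] k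
    let events := (PySem.List.pyRange 0 (k - 1) 1).foldl
      (fun evs i => insEvt (PySem.List.pyGetD val i 0 + PySem.List.pyGetD val (i + 1) 0, i, i + 1) evs) []
    let r := loopB (k - target).toNat val nxt prv alive events
    (PySem.List.min? (((PySem.List.pyRange 0 k 1).filter
        (fun i => PySem.List.pyGetD r.2 i false)).map
        (fun i => PySem.List.pyGetD r.1 i 0)) (fun x => x)).getD 0

-- ===== PRECONDITION & SPEC =====
-- A raises ValueError (min of an empty list) whenever nums has fewer than two elements or m ≤ 1;
-- Pre_ admits exactly the inputs on which A returns normally.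
def Pre_globalMax (nums : List Int) (m : Int) : Prop := 2 ≤ nums.length ∧ 2 ≤ m
instance (nums : List Int) (m : Int) : Decidable (Pre_globalMax nums m) := by
  unfold Pre_globalMax; infer_instance
def pvWitness_globalMax : List Int × Int := ([0, 1], 2)

def Spec_globalMax (nums : List Int) (m : Int) (out : Int) : Prop := out = globalMax_alt nums m
instance (nums : List Int) (m : Int) (out : Int) : Decidable (Spec_globalMax nums m out) := by
  unfold Spec_globalMax; infer_instance

-- ===== CLAIM (what is proved, stated in full; the proofs are below) =====
def Claim_equal_globalMax : Prop := ∀ (nums : List Int) (m : Int), Dom_globalMax nums m →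
  Pre_globalMax nums m → Spec_globalMax nums m (globalMax nums m)

-- ===== LEMMAS AND PROOFS =====

-- shorthand: current interval list represented by an index list over `val`
def mapv (idxs : List Nat) (val : List Int) : List Int := idxs.map (fun i => val.getD i 0)

def gapsOf (xs : List Int) : List Int := List.zipWith (fun a b => a + b) xs xs.tail

def stepList (xs : List Int) : List Int :=
  let gaps := gapsOf xs
  let mn := (PySem.List.min? gaps (fun x => x)).getD 0
  let p := (PySem.List.index? gaps mn).getD 0
  xs.take p ++ [mn] ++ xs.drop (p + 2)

def SortedE (events : List (Int × Int × Int)) : Prop :=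
  events.Pairwise (fun a b => evtLt b a = false)

def EvOK (k : Nat) (e : Int × Int × Int) : Prop :=
  ∃ i j : Nat, e.2.1 = (i : Int) ∧ e.2.2 = (j : Int) ∧ i < k ∧ j < k

def LinkR (nxt prv : List Int) (a b : Nat) : Prop :=
  nxt.getD a 0 = (b : Int) ∧ prv.getD b 0 = (a : Int)

def CompR (val : List Int) (events : List (Int × Int × Int)) (a b : Nat) : Prop :=
  (val.getD a 0 + val.getD b 0, (a : Int), (b : Int)) ∈ events

def SimInv (k : Nat) (idxs : List Nat) (val nxt prv : List Int) (alive : List Bool)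
    (events : List (Int × Int × Int)) : Prop :=
  val.length = k ∧ nxt.length = k ∧ prv.length = k ∧ alive.length = k ∧
  idxs.Pairwise (· < ·) ∧ (∀ x ∈ idxs, x < k) ∧
  (∀ x, x < k → (alive.getD x false = true ↔ x ∈ idxs)) ∧
  List.IsChain (LinkR nxt prv) idxs ∧
  (∀ a, idxs.getLast? = some a → nxt.getD a 0 = -1) ∧
  (∀ a, idxs.head? = some a → prv.getD a 0 = -1) ∧
  SortedE events ∧ (∀ e ∈ events, EvOK k e) ∧
  List.IsChain (CompR val events) idxs

-- ----- evtLt order facts -----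
theorem evtLt_irrefl (e : Int × Int × Int) : evtLt e e = false := by
  simp [evtLt]

theorem evtLt_asymm {e f : Int × Int × Int} (h : evtLt e f = true) : evtLt f e = false := by
  obtain ⟨a, b, c⟩ := e; obtain ⟨d, g, i⟩ := f
  simp only [evtLt, Bool.or_eq_true, Bool.and_eq_true, decide_eq_true_eq] at h ⊢
  simp only [Bool.or_eq_false_iff, Bool.and_eq_false_iff, decide_eq_false_iff_not] at *
  omega

theorem evtLt_le_trans {e f g : Int × Int × Int} (h1 : evtLt e f = true)
    (h2 : evtLt g f = false) : evtLt g e = false := by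
  obtain ⟨a, b, c⟩ := e; obtain ⟨d, x, y⟩ := f; obtain ⟨u, v, w⟩ := g
  simp only [evtLt, Bool.or_eq_true, Bool.and_eq_true, decide_eq_true_eq] at h1
  simp only [evtLt, Bool.or_eq_false_iff, Bool.and_eq_false_iff,
    decide_eq_false_iff_not] at h2 ⊢
  omega

theorem evtLt_false_fst_le {e f : Int × Int × Int} (h : evtLt f e = false) : e.1 ≤ f.1 := by
  obtain ⟨a, b, c⟩ := e; obtain ⟨d, x, y⟩ := f
  simp only [evtLt, Bool.or_eq_false_iff, Bool.and_eq_false_iff, decide_eq_false_iff_not] at h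
  omega

theorem evtLt_of_fst_eq_snd_lt {e f : Int × Int × Int} (h1 : f.1 = e.1)
    (h2 : f.2.1 < e.2.1) : evtLt f e = true := by
  obtain ⟨a, b, c⟩ := e; obtain ⟨d, x, y⟩ := f
  simp only at h1 h2
  simp only [evtLt, Bool.or_eq_true, Bool.and_eq_true, decide_eq_true_eq]
  omega

-- ----- insEvt facts -----
theorem mem_insEvt (e f : Int × Int × Int) (l : List (Int × Int × Int)) :
    f ∈ insEvt e l ↔ f = e ∨ f ∈ l := by
  induction l with
  | nil => simp [insEvt]
  | cons g t ih =>
    by_cases h : evtLt e g = true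
    · simp [insEvt, h]
    · rw [insEvt, if_neg h]
      simp only [List.mem_cons, ih]
      tauto

theorem sortedE_insEvt (e : Int × Int × Int) (l : List (Int × Int × Int))
    (h : SortedE l) : SortedE (insEvt e l) := by
  induction l with
  | nil => simp [insEvt, SortedE]
  | cons g t ih =>
    rw [SortedE, List.pairwise_cons] at h
    by_cases hlt : evtLt e g = true
    · rw [SortedE, insEvt, if_pos hlt, List.pairwise_cons]
      refine ⟨?_, ?_⟩
      · intro x hx
        rcases List.mem_cons.mp hx with rfl | hx
        · exact evtLt_asymm hlt
        · exact evtLt_le_trans hlt (h.1 x hx)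
      · rw [SortedE] at *; exact List.pairwise_cons.mpr h
    · rw [SortedE, insEvt, if_neg hlt, List.pairwise_cons]
      refine ⟨?_, ih h.2⟩
      intro x hx
      rcases (mem_insEvt e x t).mp hx with rfl | hx
      · simpa using hlt
      · exact h.1 x hx

-- ----- popValid facts -----
theorem popValid_spec (val nxt : List Int) (alive : List Bool) :
    ∀ events : List (Int × Int × Int), SortedE events →
    (∃ f ∈ events, evtValid val nxt alive f = true) →
    evtValid val nxt alive (popValid val nxt alive events).1 = true ∧
    (popValid val nxt alive events).1 ∈ events ∧
    (∀ f ∈ events, evtValid val nxt alive f = true →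
      evtLt f (popValid val nxt alive events).1 = false) ∧
    (∀ f ∈ events, evtValid val nxt alive f = true →
      f ≠ (popValid val nxt alive events).1 → f ∈ (popValid val nxt alive events).2) ∧
    (∀ f ∈ (popValid val nxt alive events).2, f ∈ events) ∧
    SortedE (popValid val nxt alive events).2 := by
  intro events
  induction events with
  | nil => intro _ h; simp at h
  | cons g t ih =>
    intro hs hex
    rw [SortedE, List.pairwise_cons] at hs
    by_cases hv : evtValid val nxt alive g = true
    · rw [popValid, if_pos hv]
      refine ⟨hv, List.mem_cons_self, ?_, ?_, ?_, hs.2⟩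
      · intro f hf _
        rcases List.mem_cons.mp hf with rfl | hf
        · exact evtLt_irrefl f
        · exact hs.1 f hf
      · intro f hf _ hne
        rcases List.mem_cons.mp hf with rfl | hf
        · exact absurd rfl hne
        · exact hf
      · intro f hf; exact List.mem_cons_of_mem _ hf
    · rw [popValid, if_neg hv]
      obtain ⟨f, hf, hfv⟩ := hex
      rcases List.mem_cons.mp hf with rfl | hf
      · exact absurd hfv hv
      have := ih hs.2 ⟨f, hf, hfv⟩
      refine ⟨this.1, List.mem_cons_of_mem _ this.2.1, ?_, ?_, ?_, this.2.2.2.2.2⟩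
      · intro f' hf' hv'
        rcases List.mem_cons.mp hf' with rfl | hf'
        · exact absurd hv' hv
        · exact this.2.2.1 f' hf' hv'
      · intro f' hf' hv' hne
        rcases List.mem_cons.mp hf' with rfl | hf'
        · exact absurd hv' hv
        · exact this.2.2.2.1 f' hf' hv' hne
      · intro f' hf'; exact List.mem_cons_of_mem _ (this.2.2.2.2.1 f' hf')

-- ----- validity ↔ adjacency -----
theorem pair_event_mem {val : List Int} {events : List (Int × Int × Int)} {idxs u w : List Nat}
    {x y : Nat} (hComp : List.IsChain (CompR val events) idxs)
    (hd : idxs = u ++ x :: y :: w) :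
    (val.getD x 0 + val.getD y 0, (x : Int), (y : Int)) ∈ events :=
  List.isChain_iff_forall_rel_of_append_cons_cons.mp hComp hd

theorem link_of_decomp {nxt prv : List Int} {idxs u w : List Nat} {x y : Nat}
    (hLinks : List.IsChain (LinkR nxt prv) idxs) (hd : idxs = u ++ x :: y :: w) :
    nxt.getD x 0 = (y : Int) ∧ prv.getD y 0 = (x : Int) :=
  List.isChain_iff_forall_rel_of_append_cons_cons.mp hLinks hd

theorem evtValid_nat (val nxt : List Int) (alive : List Bool) (s : Int) (i j : Nat) :
    evtValid val nxt alive (s, (i : Int), (j : Int)) =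
      (alive.getD i false && decide (nxt.getD i 0 = (j : Int)) &&
        decide (val.getD i 0 + val.getD j 0 = s)) := by
  simp [evtValid, PySem.List.pyGetD_natCast]

theorem valid_of_decomp {k : Nat} {idxs : List Nat} {val nxt prv : List Int}
    {alive : List Bool} {events : List (Int × Int × Int)}
    (hInv : SimInv k idxs val nxt prv alive events)
    {pre suf : List Nat} {i j : Nat} (hd : idxs = pre ++ i :: j :: suf) :
    evtValid val nxt alive (val.getD i 0 + val.getD j 0, (i : Int), (j : Int)) = true := by
  obtain ⟨hvl, hnl, hpl, hal, hsort, hklt, hAlive, hLinks, hLast, hHead, hSE, hOK, hComp⟩ := hInv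
  have hmem : i ∈ idxs := by rw [hd]; simp
  have hik : i < k := hklt i hmem
  have hlink := link_of_decomp hLinks hd
  rw [evtValid_nat]
  simp only [Bool.and_eq_true, decide_eq_true_eq]
  exact ⟨⟨(hAlive i hik).mpr hmem, hlink.1⟩, trivial⟩

theorem decomp_of_valid {k : Nat} {idxs : List Nat} {val nxt prv : List Int}
    {alive : List Bool} {events : List (Int × Int × Int)}
    (hInv : SimInv k idxs val nxt prv alive events)
    {s : Int} {i j : Nat} (hik : i < k) (hjk : j < k)
    (hv : evtValid val nxt alive (s, (i : Int), (j : Int)) = true) :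
    ∃ pre suf, idxs = pre ++ i :: j :: suf ∧ s = val.getD i 0 + val.getD j 0 := by
  obtain ⟨hvl, hnl, hpl, hal, hsort, hklt, hAlive, hLinks, hLast, hHead, hSE, hOK, hComp⟩ := hInv
  rw [evtValid_nat] at hv
  simp only [Bool.and_eq_true, decide_eq_true_eq] at hv
  obtain ⟨⟨ha, hn⟩, hsum⟩ := hv
  have hmem : i ∈ idxs := (hAlive i hik).mp ha
  obtain ⟨pre, rest, hd⟩ := List.append_of_mem hmem
  cases rest with
  | nil =>
    exfalso
    have : idxs.getLast? = some i := by rw [hd]; exact List.getLast?_concat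
    have := hLast i this
    rw [this] at hn
    omega
  | cons b t =>
    have hlink := link_of_decomp hLinks hd
    have hbj : b = j := by
      have : (b : Int) = (j : Int) := by rw [← hlink.1, hn]
      exact_mod_cast this
    subst hbj
    exact ⟨pre, t, hd, by omega⟩

-- ----- list decomposition helpers -----
theorem decomp_at {α : Type} (l : List α) (q : Nat) (h : q + 1 < l.length) :
    l = l.take q ++ l[q] :: l[q + 1] :: l.drop (q + 2) := by
  have h1 : l[q + 1] :: l.drop (q + 2) = l.drop (q + 1) := List.getElem_cons_drop h
  have h2 : l[q]'(by omega) :: l.drop (q + 1) = l.drop q := List.getElem_cons_drop (by omega)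
  rw [h1, h2, List.take_append_drop]

theorem decomp_getElem {α : Type} {l pre suf : List α} {i j : α}
    (hd : l = pre ++ i :: j :: suf) :
    ∃ h : pre.length + 1 < l.length,
      l[pre.length]'(by omega) = i ∧ l[pre.length + 1]'h = j := by
  subst hd
  have hlen : pre.length + 1 < (pre ++ i :: j :: suf).length := by
    simp only [List.length_append, List.length_cons]
    omega
  refine ⟨hlen, ?_, ?_⟩
  · have h1 := List.getElem_append_right (as := pre) (bs := i :: j :: suf)
      (i := pre.length) (le_refl _) (h₂ := by omega)
    simpa using h1
  · have h1 := List.getElem_append_right (as := pre) (bs := i :: j :: suf)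
      (i := pre.length + 1) (by omega) (h₂ := by omega)
    simpa using h1

-- ----- gaps lemmas -----
theorem length_gapsOf (xs : List Int) : (gapsOf xs).length = xs.length - 1 := by
  simp [gapsOf, List.length_zipWith, List.length_tail]

theorem getElem_gapsOf (xs : List Int) (q : Nat) (h : q + 1 < xs.length)
    (h' : q < (gapsOf xs).length) : (gapsOf xs)[q] = xs[q] + xs[q + 1] := by
  simp [gapsOf, List.getElem_zipWith, List.getElem_tail]

theorem length_mapv (idxs : List Nat) (val : List Int) :
    (mapv idxs val).length = idxs.length := by simp [mapv]

theorem getElem_mapv (idxs : List Nat) (val : List Int) (q : Nat) (h : q < idxs.length)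
    (h' : q < (mapv idxs val).length) : (mapv idxs val)[q] = val.getD idxs[q] 0 := by
  simp [mapv]

-- ----- min / index characterization -----
theorem min_index_spec (G : List Int) (p : Nat) (hp : p < G.length)
    (hmin : ∀ q (h : q < G.length), G[p] ≤ G[q])
    (hleft : ∀ q (h : q < p), G[q]'(lt_trans h hp) ≠ G[p]) :
    (PySem.List.min? G (fun x => x)).getD 0 = G[p] ∧
    (PySem.List.index? G G[p]).getD 0 = p := by
  constructor
  · have hne : G ≠ [] := by intro h; subst h; simp at hp
    obtain ⟨m0, hm0⟩ : ∃ m0, PySem.List.min? G (fun x => x) = some m0 := by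
      cases h : PySem.List.min? G (fun x => x) with
      | none => exact absurd ((PySem.List.min?_eq_none_iff _ _).mp h) hne
      | some v => exact ⟨v, rfl⟩
    rw [hm0]
    have hmem := PySem.List.min?_mem hm0
    have hle := PySem.List.min?_isMin hm0
    obtain ⟨q, hq, hqe⟩ := List.getElem_of_mem hmem
    have h1 : G[p] ≤ m0 := by rw [← hqe]; exact hmin q hq
    have h2 : m0 ≤ G[p] := hle _ (List.getElem_mem hp)
    simp only [Option.getD_some]
    omega
  · have hdecomp : G = G.take p ++ G[p] :: G.drop (p + 1) := by
      conv_lhs => rw [← List.take_append_drop p G]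
      rw [← List.getElem_cons_drop hp]
    have hnotmem : G[p] ∉ G.take p := by
      intro hmem
      obtain ⟨q, hq, hqe⟩ := List.getElem_of_mem hmem
      have hq' : q < p := by
        have := hq; simp [List.length_take] at this; omega
      rw [List.getElem_take] at hqe
      exact hleft q hq' hqe
    have hix : PySem.List.index? G G[p] = some p := by
      rw [PySem.List.index?_eq_some_iff]
      exact ⟨G.take p, G.drop (p + 1), hdecomp, by simp [List.length_take]; omega, hnotmem⟩
    rw [hix]; rfl

-- ----- getD/set helpers -----
theorem getD_set_self (l : List Int) (i : Nat) (v : Int) (h : i < l.length) :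
    (l.set i v).getD i 0 = v := by
  rw [List.getD_eq_getElem?_getD, List.getElem?_set_self h]; rfl

theorem getD_set_ne (l : List Int) (i x : Nat) (v : Int) (h : x ≠ i) :
    (l.set i v).getD x 0 = l.getD x 0 := by
  rw [List.getD_eq_getElem?_getD, List.getElem?_set_ne (by omega), ← List.getD_eq_getElem?_getD]

theorem getD_set_self_bool (l : List Bool) (i : Nat) (v : Bool) (h : i < l.length) :
    (l.set i v).getD i false = v := by
  rw [List.getD_eq_getElem?_getD, List.getElem?_set_self h]; rfl

theorem getD_set_ne_bool (l : List Bool) (i x : Nat) (v : Bool) (h : x ≠ i) :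
    (l.set i v).getD x false = l.getD x false := by
  rw [List.getD_eq_getElem?_getD, List.getElem?_set_ne (by omega), ← List.getD_eq_getElem?_getD]

-- ----- filter characterization -----
theorem filter_eq_idxs (k : Nat) (idxs : List Nat) (alive : List Bool)
    (hs : idxs.Pairwise (· < ·)) (hk : ∀ x ∈ idxs, x < k)
    (hm : ∀ x, x < k → (alive.getD x false = true ↔ x ∈ idxs)) :
    (List.range k).filter (fun x => alive.getD x false) = idxs := by
  have hnd1 : ((List.range k).filter (fun x => alive.getD x false)).Pairwise (· < ·) :=
    List.Pairwise.sublist List.filter_sublist List.pairwise_lt_range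
  have hmem : ∀ x, x ∈ (List.range k).filter (fun x => alive.getD x false) ↔ x ∈ idxs := by
    intro x
    rw [List.mem_filter, List.mem_range]
    constructor
    · rintro ⟨hx, hax⟩; exact (hm x hx).mp hax
    · intro hx; exact ⟨hk x hx, (hm x (hk x hx)).mpr hx⟩
  have hperm : ((List.range k).filter (fun x => alive.getD x false)).Perm idxs :=
    (List.perm_ext_iff_of_nodup (hnd1.imp ne_of_lt) (hs.imp ne_of_lt)).mpr hmem
  exact List.eq_of_perm_of_sorted
    (fun a b _ _ h1 h2 => absurd (lt_trans h1 h2) (lt_irrefl a)) hnd1 hs hperm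

-- ----- A-side step -----
theorem gapsA_eq (xs : List Int) :
    (PySem.List.pyRange 0 ((xs.length : Int) - 1) 1).map
      (fun i => tCalc (PySem.List.pyGetD xs i 0, PySem.List.pyGetD xs (i + 1) 0)) =
    gapsOf xs := by
  apply List.ext_getElem
  · rw [List.length_map, PySem.List.length_pyRange_one, length_gapsOf]; omega
  · intro q h1 h2
    have hq : q + 1 < xs.length := by
      rw [List.length_map, PySem.List.length_pyRange_one] at h1; omega
    rw [List.getElem_map, PySem.List.getElem_pyRange_one, getElem_gapsOf xs q hq h2]
    have e2 : ((q : Int)) + 1 = (((q + 1 : Nat)) : Int) := by push_cast; ring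
    simp only [zero_add]
    rw [e2, PySem.List.pyGetD_natCast, PySem.List.pyGetD_natCast]
    show xs.getD q 0 + xs.getD (q + 1) 0 = _
    rw [List.getD_eq_getElem?_getD, List.getD_eq_getElem?_getD,
      List.getElem?_eq_getElem (by omega : q < xs.length), List.getElem?_eq_getElem hq]
    rfl

theorem loopA_succ (fuel : Nat) (xs : List Int) (m : Int)
    (h : m - 1 < (xs.length : Int)) :
    loopA (fuel + 1) xs m = loopA fuel (stepList xs) m := by
  simp only [loopA]
  rw [if_pos h, gapsA_eq]
  rw [show ∀ n : Nat, ((n : Int) + 2) = (((n + 2 : Nat)) : Int) from fun n => by push_cast; ring]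
  rw [PySem.List.slice_to_natCast, PySem.List.slice_from_natCast]
  rfl


theorem loopA_stop (fuel : Nat) (xs : List Int) (m : Int)
    (h : ¬ m - 1 < (xs.length : Int)) : loopA fuel xs m = xs := by
  cases fuel with
  | zero => rfl
  | succ f => rw [loopA, if_neg h]

-- ----- the B-side step (the heart of the proof) -----
-- the merged-pair update preserves the invariant (shared by all four boundary cases)
theorem simInv_after (k : Nat) (pre suf : List Nat) (i j : Nat)
    (val nxt prv prv1 : List Int) (alive : List Bool)
    (events rest ev3 : List (Int × Int × Int)) (nj : Int)
    (hInv : SimInv k (pre ++ i :: j :: suf) val nxt prv alive events)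
    (hres : ∀ f ∈ events, evtValid val nxt alive f = true →
      f ≠ (val.getD i 0 + val.getD j 0, (i : Int), (j : Int)) → f ∈ rest)
    (hnjNil : suf = [] → nj = -1)
    (hnjCons : ∀ b suf', suf = b :: suf' → nj = (b : Int))
    (hprv1len : prv1.length = k)
    (hprv1b : ∀ b suf', suf = b :: suf' → prv1.getD b 0 = (i : Int))
    (hprv1ne : ∀ x : Nat, (∀ b suf', suf = b :: suf' → x ≠ b) → prv1.getD x 0 = prv.getD x 0)
    (hS3 : SortedE ev3)
    (h3OK : ∀ f ∈ ev3, EvOK k f)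
    (h3rest : ∀ f ∈ rest, f ∈ ev3)
    (hLeft : ∀ (h : pre ≠ []),
      (val.getD (pre.getLast h) 0 + (val.getD i 0 + val.getD j 0),
        ((pre.getLast h : Nat) : Int), (i : Int)) ∈ ev3)
    (hRight : ∀ b suf', suf = b :: suf' →
      ((val.getD i 0 + val.getD j 0) + val.getD b 0, (i : Int), (b : Int)) ∈ ev3) :
    SimInv k (pre ++ i :: suf)
      (val.set i (val.getD i 0 + val.getD j 0)) (nxt.set i nj) prv1
      (alive.set j false) ev3 := by
  obtain ⟨hvl, hnl, hpl, hal, hsort, hklt, hAlive, hLinks, hLast, hHead, hSE, hOK, hComp⟩ := hInv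
  set s := val.getD i 0 + val.getD j 0 with hsdef
  -- ordering facts
  have hsortP := List.pairwise_append.mp hsort
  obtain ⟨hsortPre, hsortRest, hcross⟩ := hsortP
  have hij : i < j := (List.pairwise_cons.mp hsortRest).1 j (by simp)
  have hPreLtI : ∀ x ∈ pre, x < i := fun x hx => hcross x hx i (by simp)
  have hPreLtJ : ∀ x ∈ pre, x < j := fun x hx => hcross x hx j (by simp)
  have hSufGtJ : ∀ x ∈ suf, j < x :=
    fun x hx => (List.pairwise_cons.mp (List.pairwise_cons.mp hsortRest).2).1 x hx
  have hSufGtI : ∀ x ∈ suf, i < x := fun x hx => lt_trans hij (hSufGtJ x hx)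
  have hik : i < k := hklt i (by simp)
  have hjk : j < k := hklt j (by simp)
  -- pairs of the old list other than (i, j) survive into `rest` (hence into ev3)
  have hsurv : ∀ (u w : List Nat) (x y : Nat), pre ++ i :: j :: suf = u ++ x :: y :: w →
      x ≠ i → (val.getD x 0 + val.getD y 0, (x : Int), (y : Int)) ∈ ev3 := by
    intro u w x y hd hxi
    apply h3rest
    apply hres _ (pair_event_mem hComp hd)
      (valid_of_decomp ⟨hvl, hnl, hpl, hal, hsort, hklt, hAlive, hLinks, hLast,
        hHead, hSE, hOK, hComp⟩ hd)
    intro hbad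
    apply hxi
    have : ((x : Int)) = ((i : Int)) := congrArg (fun t => t.2.1) hbad
    exact_mod_cast this
  -- getD values after the update
  have hv1i : (val.set i s).getD i 0 = s := getD_set_self _ _ _ (by omega)
  have hv1ne : ∀ x : Nat, x ≠ i → (val.set i s).getD x 0 = val.getD x 0 :=
    fun x hx => getD_set_ne _ _ _ _ hx
  have hn1i : (nxt.set i nj).getD i 0 = nj := getD_set_self _ _ _ (by omega)
  have hn1ne : ∀ x : Nat, x ≠ i → (nxt.set i nj).getD x 0 = nxt.getD x 0 :=
    fun x hx => getD_set_ne _ _ _ _ hx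
  have hprv1neJ : ∀ x : Nat, x < j → prv1.getD x 0 = prv.getD x 0 := by
    intro x hx
    apply hprv1ne
    intro b suf' hb heq
    have hbj : j < b := hSufGtJ b (by rw [hb]; simp)
    omega
  refine ⟨by simp [hvl], by simp [hnl], hprv1len, by simp [hal], ?_, ?_, ?_, ?_, ?_, ?_,
    hS3, h3OK, ?_⟩
  · -- pairwise
    have hsub : (pre ++ i :: suf).Sublist (pre ++ i :: j :: suf) :=
      (List.Sublist.cons₂ i (List.sublist_cons_self j suf)).append_left pre
    exact hsort.sublist hsub
  · -- entries < k
    intro x hx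
    apply hklt
    have hsub : (pre ++ i :: suf).Sublist (pre ++ i :: j :: suf) :=
      (List.Sublist.cons₂ i (List.sublist_cons_self j suf)).append_left pre
    exact hsub.subset hx
  · -- alive ↔ membership
    intro x hx
    by_cases hxj : x = j
    · subst hxj
      rw [getD_set_self_bool _ _ _ (by omega)]
      constructor
      · intro h; exact absurd h (by simp)
      · intro hmem
        exfalso
        rcases List.mem_append.mp hmem with h | h
        · have := hPreLtJ x h; omega
        · rcases List.mem_cons.mp h with h | h
          · omega
          · have := hSufGtJ x h; omega
    · rw [getD_set_ne_bool _ _ _ _ hxj, hAlive x hx]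
      constructor
      · intro hmem
        rcases List.mem_append.mp hmem with h | h
        · exact List.mem_append.mpr (Or.inl h)
        · rcases List.mem_cons.mp h with h | h
          · exact List.mem_append.mpr (Or.inr (by simp [h]))
          · rcases List.mem_cons.mp h with h | h
            · exact absurd h hxj
            · exact List.mem_append.mpr (Or.inr (by simp [h]))
      · intro hmem
        rcases List.mem_append.mp hmem with h | h
        · exact List.mem_append.mpr (Or.inl h)
        · rcases List.mem_cons.mp h with h | h
          · exact List.mem_append.mpr (Or.inr (by simp [h]))
          · exact List.mem_append.mpr (Or.inr (by simp [h]))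
  · -- links chain
    have hold := List.isChain_append.mp hLinks
    apply List.isChain_append.mpr
    refine ⟨?_, ?_, ?_⟩
    · -- within pre
      apply hold.1.imp_of_mem_imp
      intro a b ha hb hr
      unfold LinkR at hr ⊢
      rw [hn1ne a (by have := hPreLtI a ha; omega),
        hprv1neJ b (hPreLtJ b hb)]
      exact hr
    · -- i :: suf
      cases suf with
      | nil => exact List.isChain_singleton i
      | cons b suf' =>
        apply List.isChain_cons_cons.mpr
        constructor
        · unfold LinkR
          constructor
          · rw [hn1i]; exact hnjCons b suf' rfl
          · exact hprv1b b suf' rfl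
        · -- chain on b :: suf'
          have hold2 : List.IsChain (LinkR nxt prv) (b :: suf') :=
            (List.isChain_cons_cons.mp ((List.isChain_cons_cons.mp hold.2.1).2)).2
          apply hold2.imp_of_mem_tail_imp
          intro a c ha hc hr
          unfold LinkR at hr ⊢
          have hbc : b < c := by
            rcases List.pairwise_cons.mp
              ((List.pairwise_cons.mp (List.pairwise_cons.mp hsortRest).2).2) with ⟨h1, _⟩
            exact h1 c hc
          rw [hn1ne a (by have := hSufGtI a ha; omega)]
          rw [hprv1ne c (by intro b0 s0 h0 hceq; injection h0 with h0a h0b; omega)]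
          exact hr
    · -- boundary
      intro x hx y hy
      simp only [List.head?_cons, Option.mem_def, Option.some.injEq] at hy
      subst hy
      rw [Option.mem_def] at hx
      have hxmem : x ∈ pre := List.mem_of_getLast? hx
      have hr := hold.2.2 x (by rw [Option.mem_def]; exact hx) i (by simp)
      unfold LinkR at hr ⊢
      rw [hn1ne x (by have := hPreLtI x hxmem; omega), hprv1ne i
        (by intro b0 s0 h0 hieq; have := hSufGtI b0 (by rw [h0]; simp); omega)]
      exact hr
  · -- last
    intro a ha
    cases suf with
    | nil =>
      have : (pre ++ [i]).getLast? = some i := List.getLast?_concat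
      rw [this] at ha
      simp only [Option.some.injEq] at ha
      subst ha
      rw [hn1i, hnjNil rfl]
    | cons b suf' =>
      rw [List.getLast?_append_cons, List.getLast?_cons_cons] at ha
      have hamem : a ∈ b :: suf' := List.mem_of_getLast? ha
      have haJ : j < a := hSufGtJ a (by simpa using hamem)
      rw [hn1ne a (by omega)]
      apply hLast
      rw [List.getLast?_append_cons, List.getLast?_cons_cons, List.getLast?_cons_cons]
      exact ha
  · -- head
    intro a ha
    cases pre with
    | nil =>
      simp only [List.nil_append, List.head?_cons, Option.some.injEq] at ha
      subst ha
      rw [hprv1neJ i hij]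
      exact hHead i (by simp)
    | cons h0 t0 =>
      simp only [List.cons_append, List.head?_cons, Option.some.injEq] at ha
      subst ha
      rw [hprv1neJ h0 (hPreLtJ h0 (by simp))]
      exact hHead h0 (by simp)
  · -- completeness chain
    apply List.isChain_append.mpr
    refine ⟨?_, ?_, ?_⟩
    · -- within pre
      apply List.isChain_iff_forall_rel_of_append_cons_cons.mpr
      intro x y u w hd
      unfold CompR
      have hxpre : x ∈ pre := by rw [hd]; simp
      have hypre : y ∈ pre := by rw [hd]; simp
      rw [hv1ne x (by have := hPreLtI x hxpre; omega),
        hv1ne y (by have := hPreLtI y hypre; omega)]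
      exact hsurv u (w ++ i :: j :: suf) x y
        (by rw [hd]; simp) (by have := hPreLtI x hxpre; omega)
    · -- i :: suf
      cases suf with
      | nil => exact List.isChain_singleton i
      | cons b suf' =>
        apply List.isChain_cons_cons.mpr
        constructor
        · unfold CompR
          rw [hv1i, hv1ne b (by have := hSufGtI b (by simp); omega)]
          exact hRight b suf' rfl
        · apply List.isChain_iff_forall_rel_of_append_cons_cons.mpr
          intro x y u w hd
          unfold CompR
          have hxsuf : x ∈ b :: suf' := by rw [hd]; simp
          have hysuf : y ∈ b :: suf' := by rw [hd]; simp
          rw [hv1ne x (by have := hSufGtI x hxsuf; omega),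
            hv1ne y (by have := hSufGtI y hysuf; omega)]
          exact hsurv (pre ++ i :: j :: u) w x y
            (by rw [hd]; simp)
            (by have := hSufGtI x hxsuf; omega)
    · -- boundary: last of pre with i
      intro x hx y hy
      simp only [List.head?_cons, Option.mem_def, Option.some.injEq] at hy
      subst hy
      have hpne : pre ≠ [] := by intro hn; rw [hn] at hx; simp at hx
      rw [Option.mem_def, List.getLast?_eq_getLast_of_ne_nil hpne,
        Option.some.injEq] at hx
      subst hx
      unfold CompR
      have hxmem : pre.getLast hpne ∈ pre := List.getLast_mem hpne
      rw [hv1ne _ (by have := hPreLtI _ hxmem; omega), hv1i]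
      exact hLeft hpne

theorem stepB_sim (k : Nat) (idxs : List Nat) (val nxt prv : List Int) (alive : List Bool)
    (events : List (Int × Int × Int)) (hInv : SimInv k idxs val nxt prv alive events)
    (hlen : 2 ≤ idxs.length) :
    ∃ idxs' val1 nxt1 prv1 alive1 ev3,
      (∀ c : Nat, loopB (c + 1) val nxt prv alive events = loopB c val1 nxt1 prv1 alive1 ev3) ∧
      SimInv k idxs' val1 nxt1 prv1 alive1 ev3 ∧
      idxs'.length + 1 = idxs.length ∧
      mapv idxs' val1 = stepList (mapv idxs val) := by
  have hInv' := hInv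
  obtain ⟨hvl, hnl, hpl, hal, hsort, hklt, hAlive, hLinks, hLast, hHead, hSE, hOK, hComp⟩ := hInv'
  have hex : ∃ f ∈ events, evtValid val nxt alive f = true := by
    have hdq := decomp_at idxs 0 (by omega)
    exact ⟨_, pair_event_mem hComp hdq, valid_of_decomp hInv hdq⟩
  obtain ⟨hve, heMem, hmin, hres0, hsubE, hSErest⟩ := popValid_spec val nxt alive events hSE hex
  obtain ⟨i, j, hei, hej, hik, hjk⟩ := hOK _ heMem
  have heform : (popValid val nxt alive events).1 =
      ((popValid val nxt alive events).1.1, (i : Int), (j : Int)) := by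
    rw [← hei, ← hej]
  obtain ⟨pre, suf, hd, hsum⟩ := decomp_of_valid hInv hik hjk (heform ▸ hve)
  set s := val.getD i 0 + val.getD j 0 with hsdef
  have hP1 : (popValid val nxt alive events).1 = (s, (i : Int), (j : Int)) := by
    rw [heform, hsum]
  have hPV : popValid val nxt alive events =
      ((s, (i : Int), (j : Int)), (popValid val nxt alive events).2) :=
    Prod.ext hP1 rfl
  set rest := (popValid val nxt alive events).2 with hrestdef
  rw [hP1] at hmin hres0
  have hres : ∀ f ∈ events, evtValid val nxt alive f = true →
      f ≠ (s, (i : Int), (j : Int)) → f ∈ rest := hres0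
  -- ordering facts
  obtain ⟨hsortPre, hsortRest, hcross⟩ := List.pairwise_append.mp (hd ▸ hsort)
  have hij : i < j := (List.pairwise_cons.mp hsortRest).1 j (by simp)
  have hPreLtI : ∀ x ∈ pre, x < i := fun x hx => hcross x hx i (by simp)
  have hSufGtJ : ∀ x ∈ suf, j < x :=
    fun x hx => (List.pairwise_cons.mp (List.pairwise_cons.mp hsortRest).2).1 x hx
  have hSufGtI : ∀ x ∈ suf, i < x := fun x hx => lt_trans hij (hSufGtJ x hx)
  -- position of the merged pair among the gaps
  obtain ⟨hplen, hgi, hgj⟩ := decomp_getElem hd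
  have hpG : pre.length < (gapsOf (mapv idxs val)).length := by
    rw [length_gapsOf, length_mapv]; omega
  have hGq : ∀ q (h : q + 1 < idxs.length) (h' : q < (gapsOf (mapv idxs val)).length),
      (gapsOf (mapv idxs val))[q] =
        val.getD (idxs[q]'(by omega)) 0 + val.getD (idxs[q + 1]'h) 0 := by
    intro q h h'
    rw [getElem_gapsOf _ _ (by rw [length_mapv]; exact h)
      (by rw [length_gapsOf, length_mapv]; omega)]
    rw [getElem_mapv _ _ _ (by omega) (by rw [length_mapv]; omega),
      getElem_mapv _ _ _ (by omega) (by rw [length_mapv]; omega)]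
  have hGp : (gapsOf (mapv idxs val))[pre.length]'hpG = s := by
    rw [hGq pre.length hplen hpG, hgi, hgj]
  have hminG : ∀ q (h : q < (gapsOf (mapv idxs val)).length),
      (gapsOf (mapv idxs val))[pre.length]'hpG ≤ (gapsOf (mapv idxs val))[q] := by
    intro q hq
    have hq1 : q + 1 < idxs.length := by
      rw [length_gapsOf, length_mapv] at hq; omega
    have hdq := decomp_at idxs q hq1
    have hle := hmin _ (pair_event_mem hComp hdq) (valid_of_decomp hInv hdq)
    have hfst := evtLt_false_fst_le hle
    rw [hGp, hGq q hq1 hq]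
    exact hfst
  have hleftG : ∀ q (h : q < pre.length),
      (gapsOf (mapv idxs val))[q]'(lt_trans h hpG) ≠
        (gapsOf (mapv idxs val))[pre.length]'hpG := by
    intro q hq hbad
    have hq1 : q + 1 < idxs.length := by omega
    have hdq := decomp_at idxs q hq1
    have hle := hmin _ (pair_event_mem hComp hdq) (valid_of_decomp hInv hdq)
    have hidxlt : idxs[q]'(by omega) < i := by
      rw [← hgi]
      exact List.pairwise_iff_getElem.mp hsort q pre.length (by omega) (by omega) hq
    rw [evtLt_of_fst_eq_snd_lt (by
        show val.getD (idxs[q]'(by omega)) 0 + val.getD (idxs[q + 1]'hq1) 0 = s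
        rw [← hGq q hq1 (by omega), hbad, hGp])
      (by show ((idxs[q]'(by omega) : Nat) : Int) < ((i : Nat) : Int); exact_mod_cast hidxlt)]
      at hle
    simp at hle
  obtain ⟨hmn, hidx⟩ := min_index_spec (gapsOf (mapv idxs val)) pre.length hpG hminG hleftG
  rw [hGp] at hmn hidx
  -- stepList computes the merged list
  have hplen' : (mapv pre val).length = pre.length := by simp [mapv]
  have hstep : stepList (mapv idxs val) = mapv pre val ++ [s] ++ mapv suf val := by
    simp only [stepList]
    rw [hmn, hidx]
    have hxsd : mapv idxs val =
        mapv pre val ++ val.getD i 0 :: val.getD j 0 :: mapv suf val := by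
      rw [hd]; simp [mapv]
    rw [hxsd]
    have ht : (mapv pre val ++ val.getD i 0 :: val.getD j 0 :: mapv suf val).take pre.length
        = mapv pre val := by
      rw [List.take_append_of_le_length (by omega), ← hplen', List.take_length]
    have hdr : (mapv pre val ++ val.getD i 0 :: val.getD j 0 :: mapv suf val).drop
        (pre.length + 2) = mapv suf val := by
      have hrw : mapv pre val ++ val.getD i 0 :: val.getD j 0 :: mapv suf val =
          (mapv pre val ++ [val.getD i 0, val.getD j 0]) ++ mapv suf val := by simp
      rw [hrw,
        show pre.length + 2 = (mapv pre val ++ [val.getD i 0, val.getD j 0]).length by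
          simp [hplen'],
        List.drop_left]
    rw [ht, hdr]
  -- neighbour values
  have hnjNil : suf = [] → nxt.getD j 0 = -1 := by
    intro hsuf
    apply hLast
    rw [hd, hsuf, show pre ++ [i, j] = (pre ++ [i]) ++ [j] by simp]
    exact List.getLast?_concat
  have hnjCons : ∀ b suf', suf = b :: suf' → nxt.getD j 0 = (b : Int) := by
    intro b suf' hsuf
    exact (link_of_decomp hLinks (by rw [hd, hsuf]; simp :
      idxs = (pre ++ [i]) ++ j :: b :: suf')).1
  have hpiNil : pre = [] → prv.getD i 0 = -1 := by
    intro hpre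
    apply hHead
    rw [hd, hpre]
    rfl
  have hpiCons : ∀ u a, pre = u ++ [a] → prv.getD i 0 = ((a : Nat) : Int) := by
    intro u a hu
    exact (link_of_decomp hLinks (by rw [hd, hu]; simp :
      idxs = u ++ a :: i :: (j :: suf))).2
  -- common map fact
  have hvset : ∀ x : Nat, x ≠ i → (val.set i s).getD x 0 = val.getD x 0 :=
    fun x hx => getD_set_ne _ _ _ _ hx
  have hmapv' : mapv (pre ++ i :: suf) (val.set i s) = mapv pre val ++ [s] ++ mapv suf val := by
    rw [mapv, List.map_append, List.map_cons]
    have h1 : (pre.map fun x => (val.set i s).getD x 0) = mapv pre val :=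
      List.map_congr_left fun x hx => hvset x (by have := hPreLtI x hx; omega)
    have h2 : (suf.map fun x => (val.set i s).getD x 0) = mapv suf val :=
      List.map_congr_left fun x hx => hvset x (by have := hSufGtI x hx; omega)
    have h3 : (val.set i s).getD i 0 = s := getD_set_self _ _ _ (by omega)
    rw [h1, h2, h3]
    simp [mapv]
  have hlen' : (pre ++ i :: suf).length + 1 = idxs.length := by
    rw [hd]; simp only [List.length_append, List.length_cons]; omega
  have hresOK : ∀ f ∈ rest, EvOK k f := fun f hf => hOK f (hsubE f hf)
  cases suf with
  | nil =>
    have hnj : nxt.getD j 0 = -1 := hnjNil rfl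
    by_cases hpre : pre = []
    · subst hpre
      have hpi : prv.getD i 0 = -1 := hpiNil rfl
      refine ⟨[] ++ i :: [], val.set i s, nxt.set i (nxt.getD j 0), prv,
        alive.set j false, rest, ?_, ?_, hlen', by rw [hmapv', hstep]⟩
      · intro c
        simp only [loopB, hPV, PySem.List.pySetD_natCast, PySem.List.pyGetD_natCast]
        rw [hnj]
        rw [if_neg (by omega : ¬ (-1 : Int) ≠ -1)]
        rw [hpi]
        rw [if_neg (by omega : ¬ (-1 : Int) ≠ -1)]
        rw [if_neg (by omega : ¬ (-1 : Int) ≠ -1)]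
      · refine simInv_after k [] [] i j val nxt prv prv alive events rest rest
          (nxt.getD j 0) (hd ▸ hInv) hres (fun _ => hnj) ?_ hpl ?_ (fun x _ => rfl)
          hSErest hresOK (fun f hf => hf) ?_ ?_
        · intro b0 s0 h0; cases h0
        · intro b0 s0 h0; cases h0
        · intro hne; cases hne rfl
        · intro b0 s0 h0; cases h0
    · obtain ⟨u, a, hu⟩ := (List.eq_nil_or_concat pre).resolve_left hpre
      rw [List.concat_eq_append] at hu
      have hpi : prv.getD i 0 = ((a : Nat) : Int) := hpiCons u a hu
      have haI : a < i := hPreLtI a (by rw [hu]; simp)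
      have hak : a < k := by omega
      have hlast_a : ∀ h : pre ≠ [], pre.getLast h = a := by
        intro h
        have h1 : pre.getLast? = some a := by rw [hu]; exact List.getLast?_concat
        rw [List.getLast?_eq_getLast_of_ne_nil h] at h1
        exact (Option.some.injEq _ _).mp h1
      refine ⟨pre ++ i :: [], val.set i s, nxt.set i (nxt.getD j 0), prv,
        alive.set j false, insEvt (val.getD a 0 + s, (a : Int), (i : Int)) rest,
        ?_, ?_, hlen', by rw [hmapv', hstep]⟩
      · intro c
        simp only [loopB, hPV, PySem.List.pySetD_natCast, PySem.List.pyGetD_natCast]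
        rw [hnj]
        rw [if_neg (by omega : ¬ (-1 : Int) ≠ -1)]
        rw [hpi]
        rw [if_pos (by omega : ((a : Nat) : Int) ≠ -1)]
        rw [if_neg (by omega : ¬ (-1 : Int) ≠ -1)]
        simp only [PySem.List.pyGetD_natCast]
        rw [hvset a (by omega)]
      · refine simInv_after k pre [] i j val nxt prv prv alive events rest _
          (nxt.getD j 0) (hd ▸ hInv) hres (fun _ => hnj) ?_ hpl ?_ (fun x _ => rfl)
          (sortedE_insEvt _ _ hSErest) ?_
          (fun f hf => (mem_insEvt _ _ _).mpr (Or.inr hf)) ?_ ?_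
        · intro b0 s0 h0; cases h0
        · intro b0 s0 h0; cases h0
        · intro f hf
          rcases (mem_insEvt _ _ _).mp hf with rfl | hf
          · exact ⟨a, i, rfl, rfl, hak, hik⟩
          · exact hresOK f hf
        · intro hne
          rw [hlast_a hne]
          exact (mem_insEvt _ _ _).mpr (Or.inl rfl)
        · intro b0 s0 h0; cases h0
  | cons b suf' =>
    have hnj : nxt.getD j 0 = ((b : Nat) : Int) := hnjCons b suf' rfl
    have hbmem : b ∈ b :: suf' := by simp
    have hbk : b < k := hklt b (by rw [hd]; simp)
    have hbi : i < b := hSufGtI b hbmem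
    have hbj : j < b := hSufGtJ b hbmem
    have hprvset : ∀ x : Nat, x ≠ b → (prv.set b (i : Int)).getD x 0 = prv.getD x 0 :=
      fun x hx => getD_set_ne _ _ _ _ hx
    have hprv1len : (prv.set b (i : Int)).length = k := by simp [hpl]
    have hprv1b : ∀ b0 s0, (b :: suf' : List Nat) = b0 :: s0 →
        (prv.set b (i : Int)).getD b0 0 = (i : Int) := by
      intro b0 s0 h0
      injection h0 with h1 h2
      subst h1
      exact getD_set_self _ _ _ (by omega)
    have hprv1ne : ∀ x : Nat, (∀ b0 s0, (b :: suf' : List Nat) = b0 :: s0 → x ≠ b0) →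
        (prv.set b (i : Int)).getD x 0 = prv.getD x 0 :=
      fun x hx => hprvset x (hx b suf' rfl)
    have hnjCons' : ∀ b0 s0, (b :: suf' : List Nat) = b0 :: s0 →
        nxt.getD j 0 = (b0 : Int) := by
      intro b0 s0 h0
      injection h0 with h1 h2
      subst h1
      exact hnj
    by_cases hpre : pre = []
    · subst hpre
      have hpi : prv.getD i 0 = -1 := hpiNil rfl
      refine ⟨[] ++ i :: b :: suf', val.set i s, nxt.set i (nxt.getD j 0),
        prv.set b (i : Int), alive.set j false,
        insEvt (s + val.getD b 0, (i : Int), (b : Int)) rest,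
        ?_, ?_, hlen', by rw [hmapv', hstep]⟩
      · intro c
        simp only [loopB, hPV, PySem.List.pySetD_natCast, PySem.List.pyGetD_natCast]
        rw [hnj]
        rw [if_pos (by omega : ((b : Nat) : Int) ≠ -1)]
        simp only [PySem.List.pySetD_natCast]
        rw [hprvset i (by omega), hpi]
        rw [if_neg (by omega : ¬ (-1 : Int) ≠ -1)]
        rw [if_pos (by omega : ((b : Nat) : Int) ≠ -1)]
        simp only [PySem.List.pyGetD_natCast]
        rw [hvset b (by omega)]
      · refine simInv_after k [] (b :: suf') i j val nxt prv (prv.set b (i : Int))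
          alive events rest _ (nxt.getD j 0) (hd ▸ hInv) hres ?_ hnjCons'
          hprv1len hprv1b hprv1ne (sortedE_insEvt _ _ hSErest) ?_
          (fun f hf => (mem_insEvt _ _ _).mpr (Or.inr hf)) ?_ ?_
        · intro h0; cases h0
        · intro f hf
          rcases (mem_insEvt _ _ _).mp hf with rfl | hf
          · exact ⟨i, b, rfl, rfl, hik, hbk⟩
          · exact hresOK f hf
        · intro hne; cases hne rfl
        · intro b0 s0 h0
          injection h0 with h1 h2
          subst h1
          exact (mem_insEvt _ _ _).mpr (Or.inl rfl)
    · obtain ⟨u, a, hu⟩ := (List.eq_nil_or_concat pre).resolve_left hpre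
      rw [List.concat_eq_append] at hu
      have hpi : prv.getD i 0 = ((a : Nat) : Int) := hpiCons u a hu
      have haI : a < i := hPreLtI a (by rw [hu]; simp)
      have hak : a < k := by omega
      have hlast_a : ∀ h : pre ≠ [], pre.getLast h = a := by
        intro h
        have h1 : pre.getLast? = some a := by rw [hu]; exact List.getLast?_concat
        rw [List.getLast?_eq_getLast_of_ne_nil h] at h1
        exact (Option.some.injEq _ _).mp h1
      refine ⟨pre ++ i :: b :: suf', val.set i s, nxt.set i (nxt.getD j 0),
        prv.set b (i : Int), alive.set j false,
        insEvt (s + val.getD b 0, (i : Int), (b : Int))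
          (insEvt (val.getD a 0 + s, (a : Int), (i : Int)) rest),
        ?_, ?_, hlen', by rw [hmapv', hstep]⟩
      · intro c
        simp only [loopB, hPV, PySem.List.pySetD_natCast, PySem.List.pyGetD_natCast]
        rw [hnj]
        rw [if_pos (by omega : ((b : Nat) : Int) ≠ -1)]
        simp only [PySem.List.pySetD_natCast]
        rw [hprvset i (by omega), hpi]
        rw [if_pos (by omega : ((a : Nat) : Int) ≠ -1)]
        rw [if_pos (by omega : ((b : Nat) : Int) ≠ -1)]
        simp only [PySem.List.pyGetD_natCast]
        rw [hvset a (by omega), hvset b (by omega)]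
      · refine simInv_after k pre (b :: suf') i j val nxt prv (prv.set b (i : Int))
          alive events rest _ (nxt.getD j 0) (hd ▸ hInv) hres ?_ hnjCons'
          hprv1len hprv1b hprv1ne
          (sortedE_insEvt _ _ (sortedE_insEvt _ _ hSErest)) ?_
          (fun f hf => (mem_insEvt _ _ _).mpr
            (Or.inr ((mem_insEvt _ _ _).mpr (Or.inr hf)))) ?_ ?_
        · intro h0; cases h0
        · intro f hf
          rcases (mem_insEvt _ _ _).mp hf with rfl | hf
          · exact ⟨i, b, rfl, rfl, hik, hbk⟩
          rcases (mem_insEvt _ _ _).mp hf with rfl | hf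
          · exact ⟨a, i, rfl, rfl, hak, hik⟩
          · exact hresOK f hf
        · intro hne
          rw [hlast_a hne]
          exact (mem_insEvt _ _ _).mpr
            (Or.inr ((mem_insEvt _ _ _).mpr (Or.inl rfl)))
        · intro b0 s0 h0
          injection h0 with h1 h2
          subst h1
          exact (mem_insEvt _ _ _).mpr (Or.inl rfl)

-- ----- main loop simulation -----
theorem loop_sim (k targetN : Nat) (m : Int) (hm : m - 1 = (targetN : Int)) (ht : 1 ≤ targetN) :
    ∀ (c : Nat) (idxs : List Nat) (val nxt prv : List Int) (alive : List Bool)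
      (events : List (Int × Int × Int)) (fuel : Nat),
      SimInv k idxs val nxt prv alive events → idxs.length = c + targetN → c ≤ fuel →
      ((List.range k).filter
          (fun x => (loopB c val nxt prv alive events).2.getD x false)).map
        (fun i => (loopB c val nxt prv alive events).1.getD i 0) =
      loopA fuel (mapv idxs val) m := by
  intro c
  induction c with
  | zero =>
    intro idxs val nxt prv alive events fuel hInv hlc _
    obtain ⟨hvl, hnl, hpl, hal, hsort, hklt, hAlive, _, _, _, _, _, _⟩ := hInv
    rw [loopB]
    have hstop : ¬ m - 1 < ((mapv idxs val).length : Int) := by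
      rw [length_mapv, hlc]; omega
    rw [loopA_stop fuel _ m hstop]
    rw [filter_eq_idxs k idxs alive hsort hklt hAlive]
    rfl
  | succ c ih =>
    intro idxs val nxt prv alive events fuel hInv hlc hcf
    obtain ⟨idxs', val1, nxt1, prv1, alive1, ev3, hstep, hInv', hlen', hmap⟩ :=
      stepB_sim k idxs val nxt prv alive events hInv (by omega)
    cases fuel with
    | zero => omega
    | succ f =>
      rw [hstep c]
      rw [loopA_succ f (mapv idxs val) m (by rw [length_mapv, hlc]; push_cast; omega)]
      rw [← hmap]
      exact ih idxs' val1 nxt1 prv1 alive1 ev3 f hInv' (by omega) (by omega)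

-- ----- initial state -----
theorem mem_foldl_insEvt (g : Int → Int × Int × Int) (L : List Int) :
    ∀ (acc : List (Int × Int × Int)) (e : Int × Int × Int),
      e ∈ L.foldl (fun evs i => insEvt (g i) evs) acc ↔ e ∈ acc ∨ ∃ i ∈ L, e = g i := by
  induction L with
  | nil => intro acc e; simp
  | cons x t ih =>
    intro acc e
    rw [List.foldl_cons, ih, mem_insEvt]
    simp only [List.mem_cons]
    constructor
    · rintro ((rfl | h) | ⟨i, hi, rfl⟩)
      · exact Or.inr ⟨x, Or.inl rfl, rfl⟩
      · exact Or.inl h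
      · exact Or.inr ⟨i, Or.inr hi, rfl⟩
    · rintro (h | ⟨i, (rfl | hi), rfl⟩)
      · exact Or.inl (Or.inr h)
      · exact Or.inl (Or.inl rfl)
      · exact Or.inr ⟨i, hi, rfl⟩

theorem sortedE_foldl_insEvt (g : Int → Int × Int × Int) (L : List Int) :
    ∀ acc : List (Int × Int × Int), SortedE acc →
      SortedE (L.foldl (fun evs i => insEvt (g i) evs) acc) := by
  induction L with
  | nil => intro acc h; exact h
  | cons x t ih => intro acc h; exact ih _ (sortedE_insEvt _ _ h)

theorem init_inv (kN : Nat) (hk : 1 ≤ kN) (v0 : List Int) (hv0 : v0.length = kN)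
    (ev0 : List (Int × Int × Int))
    (hev0 : ev0 = (PySem.List.pyRange 0 ((kN : Int) - 1) 1).foldl
      (fun evs i => insEvt (PySem.List.pyGetD v0 i 0 + PySem.List.pyGetD v0 (i + 1) 0,
        i, i + 1) evs) []) :
    SimInv kN (List.range kN) v0
      (PySem.List.pySetD ((PySem.List.pyRange 0 (kN : Int) 1).map (fun i => i + 1))
        ((kN : Int) - 1) (-1))
      ((PySem.List.pyRange 0 (kN : Int) 1).map (fun i => i - 1))
      (PySem.List.pyRepeat [true] (kN : Int)) ev0 := by
  have hcast : ((kN : Int) - 1) = (((kN - 1 : Nat)) : Int) := by omega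
  have hnxtEq : PySem.List.pySetD ((PySem.List.pyRange 0 (kN : Int) 1).map (fun i => i + 1))
      ((kN : Int) - 1) (-1) =
      ((PySem.List.pyRange 0 (kN : Int) 1).map (fun i => i + 1)).set (kN - 1) (-1) := by
    rw [hcast, PySem.List.pySetD_natCast]
  have haliveEq : PySem.List.pyRepeat ([true] : List Bool) (kN : Int) =
      List.replicate kN true := by
    rw [PySem.List.pyRepeat_singleton]; simp
  have hB0len : ((PySem.List.pyRange 0 (kN : Int) 1).map (fun i => i + 1)).length = kN := by
    rw [List.length_map, PySem.List.length_pyRange_one]; omega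
  have hB0 : ∀ q, q < kN →
      ((PySem.List.pyRange 0 (kN : Int) 1).map (fun i => i + 1)).getD q 0 = (q : Int) + 1 := by
    intro q hq
    rw [List.getD_eq_getElem?_getD, List.getElem?_eq_getElem (by rw [hB0len]; omega)]
    simp [PySem.List.getElem_pyRange_one]
  have hnxtD : ∀ q, q < kN →
      (((PySem.List.pyRange 0 (kN : Int) 1).map (fun i => i + 1)).set (kN - 1) (-1)).getD q 0 =
      if q = kN - 1 then -1 else (q : Int) + 1 := by
    intro q hq
    by_cases hql : q = kN - 1
    · subst hql
      rw [getD_set_self _ _ _ (by rw [hB0len]; omega), if_pos rfl]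
    · rw [getD_set_ne _ _ _ _ hql, hB0 q hq, if_neg hql]
  have hprvLen : ((PySem.List.pyRange 0 (kN : Int) 1).map (fun i => i - 1)).length = kN := by
    rw [List.length_map, PySem.List.length_pyRange_one]; omega
  have hprvD : ∀ q, q < kN →
      ((PySem.List.pyRange 0 (kN : Int) 1).map (fun i => i - 1)).getD q 0 = (q : Int) - 1 := by
    intro q hq
    rw [List.getD_eq_getElem?_getD, List.getElem?_eq_getElem (by rw [hprvLen]; omega)]
    simp [PySem.List.getElem_pyRange_one]
  have haliveD : ∀ q, q < kN → (List.replicate kN true).getD q false = true := by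
    intro q hq
    rw [List.getD_eq_getElem?_getD, List.getElem?_eq_getElem (by simp; omega)]
    simp
  have hevmem : ∀ e, e ∈ ev0 ↔ ∃ i ∈ PySem.List.pyRange 0 ((kN : Int) - 1) 1,
      e = (PySem.List.pyGetD v0 i 0 + PySem.List.pyGetD v0 (i + 1) 0, i, i + 1) := by
    intro e
    rw [hev0, mem_foldl_insEvt]
    simp
  rw [hnxtEq, haliveEq]
  unfold SimInv
  refine ⟨hv0, by rw [List.length_set, hB0len], hprvLen, by simp,
    List.pairwise_lt_range, by simp, ?_, ?_, ?_, ?_, ?_, ?_, ?_⟩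
  · intro x hx
    rw [haliveD x hx]
    simp [hx]
  · rw [List.isChain_iff_getElem]
    intro q hq
    simp only [List.getElem_range]
    have hq' : q + 1 < kN := by simpa using hq
    unfold LinkR
    constructor
    · rw [hnxtD q (by omega), if_neg (by omega)]
      push_cast; ring
    · rw [hprvD (q + 1) hq']
      push_cast; ring
  · intro a ha
    have hkk : kN = (kN - 1) + 1 := by omega
    rw [hkk, List.range_succ, List.getLast?_concat] at ha
    simp only [Option.some.injEq] at ha
    subst ha
    rw [hnxtD (kN - 1) (by omega), if_pos rfl]
  · intro a ha
    have hkk : kN = (kN - 1) + 1 := by omega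
    rw [hkk, List.range_succ_eq_map] at ha
    simp only [List.head?_cons, Option.some.injEq] at ha
    subst ha
    rw [hprvD 0 (by omega)]
    simp
  · rw [hev0]
    exact sortedE_foldl_insEvt _ _ [] List.Pairwise.nil
  · intro e he
    obtain ⟨i, hi, rfl⟩ := (hevmem e).mp he
    rw [PySem.List.mem_pyRange_one] at hi
    unfold EvOK
    refine ⟨i.toNat, i.toNat + 1, ?_, ?_, by omega, by omega⟩
    · show i = ((i.toNat : Nat) : Int)
      omega
    · show i + 1 = ((i.toNat + 1 : Nat) : Int)
      push_cast
      omega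
  · rw [List.isChain_iff_getElem]
    intro q hq
    have hq' : q + 1 < kN := by simpa using hq
    simp only [List.getElem_range]
    unfold CompR
    rw [hevmem]
    refine ⟨(q : Int), ?_, ?_⟩
    · rw [PySem.List.mem_pyRange_one]; omega
    · rw [PySem.List.pyGetD_natCast]
      have hc : ((q : Int) + 1) = (((q + 1 : Nat)) : Int) := by push_cast; ring
      rw [hc, PySem.List.pyGetD_natCast]

theorem mapv_range_self (l : List Int) (n : Nat) (h : l.length = n) :
    mapv (List.range n) l = l := by
  apply List.ext_getElem
  · simp [length_mapv, h]
  · intro q h1 h2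
    rw [getElem_mapv _ _ _ (by simpa [mapv] using h1)]
    rw [List.getElem_range, List.getD_eq_getElem?_getD, List.getElem?_eq_getElem h2]
    rfl

theorem py_fm_general (l : List Nat) (al : List Bool) (v : List Int) :
    ((l.map (fun q : Nat => (q : Int))).filter
        (fun i => PySem.List.pyGetD al i false)).map (fun i => PySem.List.pyGetD v i 0) =
    (l.filter (fun x => al.getD x false)).map (fun i => v.getD i 0) := by
  induction l with
  | nil => rfl
  | cons q t ih =>
    rcases Bool.eq_false_or_eq_true (al.getD q false) with hb | hb <;>
      · have hb' := hb
        rw [List.getD_eq_getElem?_getD] at hb'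
        simp [List.filter_cons, hb, hb', ih]

theorem pyRange_zero_cast (k : Nat) :
    PySem.List.pyRange 0 (k : Int) 1 = (List.range k).map (fun q : Nat => (q : Int)) := by
  rw [PySem.List.pyRange_one]
  simp

-- ===== VERDICT (by name: the statement is the Claim_ definition above) =====
theorem globalMax_spec : Claim_equal_globalMax := by
  intro nums m _ hPre
  obtain ⟨hlen2, hm2⟩ := hPre
  show globalMax nums m = globalMax_alt nums m
  have hkcast : (nums.length : Int) - 1 = ((nums.length - 1 : Nat) : Int) := by
    push_cast; omega
  simp only [globalMax, globalMax_alt, PySem.List.foldl_append_singleton_eq_map,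
    List.nil_append]
  set kN : Nat := nums.length - 1 with hkN
  have hk1 : 1 ≤ kN := by omega
  rw [hkcast]
  set D : List Int := (PySem.List.pyRange 0 ((kN : Int)) 1).map
    (fun i => PySem.List.pyGetD nums (i + 1) 0 - PySem.List.pyGetD nums i 0) with hD
  have hDlen : D.length = kN := by
    rw [hD, List.length_map, PySem.List.length_pyRange_one]; omega
  by_cases hbr : (kN : Int) ≤ m - 1
  · rw [if_pos hbr, loopA_stop _ _ _ (by rw [hDlen]; omega)]
  · rw [if_neg hbr]
    set targetN : Nat := (m - 1).toNat with htgt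
    have htg : (targetN : Int) = m - 1 := by omega
    have ht1 : 1 ≤ targetN := by omega
    have hlt : targetN < kN := by omega
    have hcnt : ((kN : Int) - (m - 1)).toNat = kN - targetN := by omega
    rw [hcnt]
    have hInit := init_inv kN hk1 D hDlen _ rfl
    have := loop_sim kN targetN m (by omega) (by omega) (kN - targetN) (List.range kN) D _ _ _ _
      D.length hInit (by simp [hDlen]; omega) (by omega)
    rw [mapv_range_self D kN hDlen] at this
    rw [pyRange_zero_cast] at this ⊢
    rw [py_fm_general, this]
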